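-- pv_equiv track=rewrite | github.com/skylersaleh/SkyEmu | tools/gen_gba_tables.py | match_op
-- ===== SOURCE A (Python) =====
-- def bfe(value, bitoffset, size):
--   return ((value >> bitoffset) & ((1<< size) - 1));
--
-- def match_op(optable, arm_op):
--   best_match_bits = -1;
--   best_match_name = "unknown"
--
--   for opname in optable:
--     pattern = optable[opname]["pattern"];
--     bits = 0;
--     match = True;
--     for i in range(0,31):
--       if i>27: continue
--       if i<20 and i>7:continue
--       if i<4: continue;
--       bit1 = bfe(arm_op,i,1);
--       pat_bit = pattern[31-i];
--       if pat_bit == '-': continue;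
--       if pat_bit == '0' and bit1 !=0: match = False; break;
--       if pat_bit == '1' and bit1 !=1: match = False; break;
--       bits +=1
--     if match and bits > best_match_bits:
--       best_match_bits = bits;
--       best_match_name = opname;
--
--   return best_match_name;
-- ===== SOURCE B (Python) =====
-- # B: compile each pattern once into integers (mask, value, bits); a pattern matches iff
-- # (arm_op & mask) == value -- a single bitwise test instead of a per-bit scan loop.
-- def _compile(pattern):
--     mask = 0
--     value = 0
--     bits = 0
--     for i in list(range(4, 8)) + list(range(20, 28)):
--         c = pattern[31 - i]
--         if c == '-':
--             continue
--         bits += 1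
--         if c == '0':
--             mask += 1 << i
--         elif c == '1':
--             mask += 1 << i
--             value += 1 << i
--     return mask, value, bits
--
-- def match_op(optable, arm_op):
--     compiled = [(name, _compile(entry["pattern"])) for name, entry in optable.items()]
--     best_bits = -1
--     best_name = "unknown"
--     for name, (mask, value, bits) in compiled:
--         if (arm_op & mask) == value and bits > best_bits:
--             best_bits = bits
--             best_name = name
--     return best_name
-- ===== Notes on version B (the rewrite author's own statement) =====
-- stated objective: alternative
-- what changed: A tests each pattern bit-by-bit in a 31-step guarded loop with an early break; B first compiles the table into integer triples (mask, value, bits) and then decides each match with a single bitwise test (arm_op & mask) == value, in two staged passes.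
import Mathlib
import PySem

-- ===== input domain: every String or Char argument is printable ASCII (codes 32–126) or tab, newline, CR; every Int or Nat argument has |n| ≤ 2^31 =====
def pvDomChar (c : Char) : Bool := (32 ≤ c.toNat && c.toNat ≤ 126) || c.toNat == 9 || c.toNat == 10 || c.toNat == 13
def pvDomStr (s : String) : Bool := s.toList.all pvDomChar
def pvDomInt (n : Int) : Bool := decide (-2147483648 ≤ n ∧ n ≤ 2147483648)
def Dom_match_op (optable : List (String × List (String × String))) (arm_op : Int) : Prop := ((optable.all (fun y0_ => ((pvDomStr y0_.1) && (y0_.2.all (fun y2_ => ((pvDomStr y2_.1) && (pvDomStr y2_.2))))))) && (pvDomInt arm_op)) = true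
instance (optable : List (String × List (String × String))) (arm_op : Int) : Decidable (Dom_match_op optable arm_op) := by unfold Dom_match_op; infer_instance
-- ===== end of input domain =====

-- B compiles each pattern once into integer triples (mask, value, bits) and decides each match with a
-- single bitwise test (arm_op & mask) == value, in two staged passes, instead of A's per-bit loop
-- (objective: alternative algorithm of similar cost).

-- ===== PORT A =====
-- exact for 0 ≤ bitoffset and 0 ≤ size (A only calls bfe with bitoffset ∈ [0,31) and size = 1)
def bfe (value : Int) (bitoffset : Int) (size : Int) : Int :=
  PySem.Int.band (value >>> bitoffset.toNat) ((1 <<< size.toNat) - 1)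

-- A's inner 'for i in range(0,31)' loop with its continue/break structure; returns (match, bits).
-- pattern[31-i] is ported total via getD; Pre_match_op keeps the index in range wherever A returns.
def matchBits (arm_op : Int) (pattern : String) : List Int → Int → Bool × Int
  | [], bits => (true, bits)
  | i :: rest, bits =>
    if 27 < i then matchBits arm_op pattern rest bits
    else if i < 20 ∧ 7 < i then matchBits arm_op pattern rest bits
    else if i < 4 then matchBits arm_op pattern rest bits
    else
      let bit1 := bfe arm_op i 1
      let pat_bit := (PySem.Str.pyGet? pattern (31 - i)).getD ' '
      if pat_bit = '-' then matchBits arm_op pattern rest bits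
      else if pat_bit = '0' ∧ bit1 ≠ 0 then (false, bits)
      else if pat_bit = '1' ∧ bit1 ≠ 1 then (false, bits)
      else matchBits arm_op pattern rest (bits + 1)

def match_op (optable : List (String × List (String × String))) (arm_op : Int) : String :=
  (optable.foldl
    (fun best kv =>
      let pattern := (PySem.Dict.get? (⟨(PySem.Dict.get? (⟨optable⟩ : PySem.Dict String (List (String × String))) kv.1).getD []⟩ : PySem.Dict String String) "pattern").getD ""
      let r := matchBits arm_op pattern (PySem.List.pyRange 0 31 1) 0
      if r.1 ∧ r.2 > best.1 then (r.2, kv.1) else best)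
    ((-1 : Int), "unknown")).2

-- ===== PORT B =====
-- loop body of Source B's _compile: accumulator (mask, value, bits), one allowed bit position i
def cstep (pattern : String) (acc : Int × Int × Int) (i : Int) : Int × Int × Int :=
  let c := (PySem.Str.pyGet? pattern (31 - i)).getD ' '
  if c = '-' then acc
  else
    let bits := acc.2.2 + 1
    if c = '0' then (acc.1 + (1 <<< i.toNat), acc.2.1, bits)
    else if c = '1' then (acc.1 + (1 <<< i.toNat), acc.2.1 + (1 <<< i.toNat), bits)
    else (acc.1, acc.2.1, bits)

-- Source B's _compile: fold the loop body over list(range(4,8)) + list(range(20,28))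
def compilePat (pattern : String) : Int × Int × Int :=
  (PySem.List.pyRange 4 8 1 ++ PySem.List.pyRange 20 28 1).foldl (cstep pattern) (0, 0, 0)

def match_op_alt (optable : List (String × List (String × String))) (arm_op : Int) : String :=
  let compiled := optable.map (fun kv =>
    (kv.1, compilePat ((PySem.Dict.get? (⟨kv.2⟩ : PySem.Dict String String) "pattern").getD "")))
  (compiled.foldl
    (fun best nc =>
      if PySem.Int.band arm_op nc.2.1 = nc.2.2.1 ∧ nc.2.2.2 > best.1 then (nc.2.2.2, nc.1) else best)
    ((-1 : Int), "unknown")).2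

-- ===== PRECONDITION & SPEC =====
def entryOK (kv : String × List (String × String)) : Bool :=
  match PySem.Dict.get? (⟨kv.2⟩ : PySem.Dict String String) "pattern" with
  | some p => decide (28 ≤ p.toList.length)
  | none => false

-- Pre_ excludes exactly the inputs where A raises — an entry without a "pattern" key (KeyError) or with a
-- pattern shorter than 28 characters (IndexError) — and tables with duplicate outer keys, an assoc-list
-- corner a Python dict cannot represent (A looks each key up, B walks the pairs).
def Pre_match_op (optable : List (String × List (String × String))) (arm_op : Int) : Prop :=
  (optable.map Prod.fst).Nodup ∧ optable.all entryOK = true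
instance (optable : List (String × List (String × String))) (arm_op : Int) : Decidable (Pre_match_op optable arm_op) := by unfold Pre_match_op; infer_instance

def pvWitness_match_op : (List (String × List (String × String))) × Int :=
  ([("and", [("pattern", "----------------------------")])], 0)

def Spec_match_op (optable : List (String × List (String × String))) (arm_op : Int) (out : String) : Prop := out = match_op_alt optable arm_op
instance (optable : List (String × List (String × String))) (arm_op : Int) (out : String) : Decidable (Spec_match_op optable arm_op out) := by unfold Spec_match_op; infer_instance

-- ===== CLAIM (what is proved, stated in full; the proofs are below) =====
def Claim_equal_match_op : Prop := ∀ (optable : List (String × List (String × String))) (arm_op : Int), Dom_match_op optable arm_op → Pre_match_op optable arm_op → Spec_match_op optable arm_op (match_op optable arm_op)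

-- ===== LEMMAS AND PROOFS =====

-- first-match lookup in a key-nodup association list returns each member pair's own value
lemma dict_get_of_mem {ν : Type} : ∀ (l : List (String × ν)) (kv : String × ν),
    (l.map Prod.fst).Nodup → kv ∈ l →
    PySem.Dict.get? (⟨l⟩ : PySem.Dict String ν) kv.1 = some kv.2 := by
  intro l
  induction l with
  | nil => intro kv _ h; cases h
  | cons hd tl ih =>
    intro kv hnd hmem
    rcases List.mem_cons.mp hmem with rfl | hmem'
    · simp [PySem.Dict.get?, List.find?]
    · have hnd' : hd.1 ∉ tl.map Prod.fst ∧ (tl.map Prod.fst).Nodup :=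
        List.nodup_cons.mp (by simpa using hnd)
      have hne : (hd.1 == kv.1) = false := by
        refine beq_eq_false_iff_ne.mpr fun he => hnd'.1 ?_
        rw [he]; exact List.mem_map_of_mem hmem'
      have htl := ih kv hnd'.2 hmem'
      simpa [PySem.Dict.get?, List.find?, hne] using htl

-- the per-index Boolean that A's inner loop tests (true = continue without breaking)
def atomA (arm_op : Int) (pattern : String) (i : Int) : Bool :=
  decide (27 < i) || decide (i < 20 ∧ 7 < i) || decide (i < 4) ||
  (!decide ((PySem.Str.pyGet? pattern (31 - i)).getD ' ' = '0' ∧ bfe arm_op i 1 ≠ 0) &&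
   !decide ((PySem.Str.pyGet? pattern (31 - i)).getD ' ' = '1' ∧ bfe arm_op i 1 ≠ 1))

-- the per-index Boolean that counts towards bits
def cntA (pattern : String) (i : Int) : Bool :=
  (!(decide (27 < i) || decide (i < 20 ∧ 7 < i) || decide (i < 4))) &&
  decide ((PySem.Str.pyGet? pattern (31 - i)).getD ' ' ≠ '-')

lemma matchBits_fst (x : Int) (p : String) : ∀ (L : List Int) (bits : Int),
    (matchBits x p L bits).1 = L.all (atomA x p) := by
  intro L
  induction L with
  | nil => intro bits; rfl
  | cons i rest ih =>
    intro bits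
    rw [List.all_cons]
    simp only [matchBits]
    by_cases h1 : 27 < i
    · rw [if_pos h1, ih]
      have ha : atomA x p i = true := by simp [atomA, h1]
      rw [ha]; simp
    · rw [if_neg h1]
      by_cases h2 : i < 20 ∧ 7 < i
      · rw [if_pos h2, ih]
        have ha : atomA x p i = true := by simp [atomA, h2]
        rw [ha]; simp
      · rw [if_neg h2]
        by_cases h3 : i < 4
        · rw [if_pos h3, ih]
          have ha : atomA x p i = true := by simp [atomA, h3]
          rw [ha]; simp
        · rw [if_neg h3]
          by_cases h4 : (PySem.Str.pyGet? p (31 - i)).getD ' ' = '-'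
          · have h4' : (PySem.List.pyGet? p.toList (31 - i)).getD ' ' = '-' := by
              simpa [PySem.Str.pyGet?] using h4
            rw [if_pos h4, ih]
            have ha : atomA x p i = true := by simp [atomA, h4']
            rw [ha]; simp
          · rw [if_neg h4]
            by_cases h5 : (PySem.Str.pyGet? p (31 - i)).getD ' ' = '0' ∧ bfe x i 1 ≠ 0
            · have h5' : (PySem.List.pyGet? p.toList (31 - i)).getD ' ' = '0' ∧ bfe x i 1 ≠ 0 := by
                simpa [PySem.Str.pyGet?] using h5
              rw [if_pos h5]
              have ha : atomA x p i = false := by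
                simp [atomA, h1, h2, h3, h5.2, h5'.1]
              rw [ha]; simp
            · rw [if_neg h5]
              by_cases h6 : (PySem.Str.pyGet? p (31 - i)).getD ' ' = '1' ∧ bfe x i 1 ≠ 1
              · have h6' : (PySem.List.pyGet? p.toList (31 - i)).getD ' ' = '1' ∧ bfe x i 1 ≠ 1 := by
                  simpa [PySem.Str.pyGet?] using h6
                rw [if_pos h6]
                have ha : atomA x p i = false := by
                  simp [atomA, h1, h2, h3, h6.2, h6'.1]
                rw [ha]; simp
              · have h5' : ¬((PySem.List.pyGet? p.toList (31 - i)).getD ' ' = '0' ∧ bfe x i 1 ≠ 0) := by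
                  simpa [PySem.Str.pyGet?] using h5
                have h6' : ¬((PySem.List.pyGet? p.toList (31 - i)).getD ' ' = '1' ∧ bfe x i 1 ≠ 1) := by
                  simpa [PySem.Str.pyGet?] using h6
                rw [if_neg h6, ih]
                have ha : atomA x p i = true := by
                  simp [atomA]; tauto
                rw [ha]; simp

lemma matchBits_snd (x : Int) (p : String) : ∀ (L : List Int) (bits : Int),
    (matchBits x p L bits).1 = true →
    (matchBits x p L bits).2 = bits + (L.countP (cntA p) : ℤ) := by
  intro L
  induction L with
  | nil => intro bits _; simp [matchBits]
  | cons i rest ih =>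
    intro bits hm
    rw [List.countP_cons]
    simp only [matchBits] at hm ⊢
    by_cases h1 : 27 < i
    · rw [if_pos h1] at hm ⊢
      rw [ih bits hm]
      have hc : cntA p i = false := by simp [cntA, h1]
      rw [hc]; simp
    · rw [if_neg h1] at hm ⊢
      by_cases h2 : i < 20 ∧ 7 < i
      · rw [if_pos h2] at hm ⊢
        rw [ih bits hm]
        have hc : cntA p i = false := by simp [cntA, h2]
        rw [hc]; simp
      · rw [if_neg h2] at hm ⊢
        by_cases h3 : i < 4
        · rw [if_pos h3] at hm ⊢
          rw [ih bits hm]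
          have hc : cntA p i = false := by simp [cntA, h3]
          rw [hc]; simp
        · rw [if_neg h3] at hm ⊢
          by_cases h4 : (PySem.Str.pyGet? p (31 - i)).getD ' ' = '-'
          · have h4' : (PySem.List.pyGet? p.toList (31 - i)).getD ' ' = '-' := by
              simpa [PySem.Str.pyGet?] using h4
            rw [if_pos h4] at hm ⊢
            rw [ih bits hm]
            have hc : cntA p i = false := by simp [cntA, h4']
            rw [hc]; simp
          · rw [if_neg h4] at hm ⊢
            by_cases h5 : (PySem.Str.pyGet? p (31 - i)).getD ' ' = '0' ∧ bfe x i 1 ≠ 0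
            · rw [if_pos h5] at hm; simp at hm
            · rw [if_neg h5] at hm ⊢
              by_cases h6 : (PySem.Str.pyGet? p (31 - i)).getD ' ' = '1' ∧ bfe x i 1 ≠ 1
              · rw [if_pos h6] at hm; simp at hm
              · have h4' : ¬ (PySem.List.pyGet? p.toList (31 - i)).getD ' ' = '-' := by
                  simpa [PySem.Str.pyGet?] using h4
                rw [if_neg h6] at hm ⊢
                rw [ih (bits + 1) hm]
                have hc : cntA p i = true := by
                  simp [cntA, h1, h2, h3, h4']
                rw [hc]; simp; omega

lemma exists_cons28 (l : List Char) (h : 28 ≤ l.length) :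
    ∃ c0 c1 c2 c3 c4 c5 c6 c7 c8 c9 c10 c11 c12 c13 c14 c15 c16 c17 c18 c19 c20 c21 c22 c23 c24 c25 c26 c27 t, l = c0::c1::c2::c3::c4::c5::c6::c7::c8::c9::c10::c11::c12::c13::c14::c15::c16::c17::c18::c19::c20::c21::c22::c23::c24::c25::c26::c27::t := by
  rcases l with - | ⟨c0, l⟩
  · simp at h
  rcases l with - | ⟨c1, l⟩
  · simp at h
  rcases l with - | ⟨c2, l⟩
  · simp at h
  rcases l with - | ⟨c3, l⟩
  · simp at h
  rcases l with - | ⟨c4, l⟩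
  · simp at h
  rcases l with - | ⟨c5, l⟩
  · simp at h
  rcases l with - | ⟨c6, l⟩
  · simp at h
  rcases l with - | ⟨c7, l⟩
  · simp at h
  rcases l with - | ⟨c8, l⟩
  · simp at h
  rcases l with - | ⟨c9, l⟩
  · simp at h
  rcases l with - | ⟨c10, l⟩
  · simp at h
  rcases l with - | ⟨c11, l⟩
  · simp at h
  rcases l with - | ⟨c12, l⟩
  · simp at h
  rcases l with - | ⟨c13, l⟩
  · simp at h
  rcases l with - | ⟨c14, l⟩
  · simp at h
  rcases l with - | ⟨c15, l⟩
  · simp at h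
  rcases l with - | ⟨c16, l⟩
  · simp at h
  rcases l with - | ⟨c17, l⟩
  · simp at h
  rcases l with - | ⟨c18, l⟩
  · simp at h
  rcases l with - | ⟨c19, l⟩
  · simp at h
  rcases l with - | ⟨c20, l⟩
  · simp at h
  rcases l with - | ⟨c21, l⟩
  · simp at h
  rcases l with - | ⟨c22, l⟩
  · simp at h
  rcases l with - | ⟨c23, l⟩
  · simp at h
  rcases l with - | ⟨c24, l⟩
  · simp at h
  rcases l with - | ⟨c25, l⟩
  · simp at h
  rcases l with - | ⟨c26, l⟩
  · simp at h
  rcases l with - | ⟨c27, l⟩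
  · simp at h
  exact ⟨c0, c1, c2, c3, c4, c5, c6, c7, c8, c9, c10, c11, c12, c13, c14, c15, c16, c17, c18, c19, c20, c21, c22, c23, c24, c25, c26, c27, l, rfl⟩

-- ---- B-side semantic layer: pattern as a (position, char) list, mask/value as bit sums ----

-- the i-th binary digit of a (Python semantics: (a >> i) % 2, two's complement for negatives)
def bitOf (a : Int) (p : Nat) : Int := PySem.Int.mod (a >>> p) 2

def mkN : List (Nat × Char) → Nat
  | [] => 0
  | (p, c) :: l => (if c = '0' ∨ c = '1' then 2^p else 0) + mkN l

def vlN : List (Nat × Char) → Nat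
  | [] => 0
  | (p, c) :: l => (if c = '1' then 2^p else 0) + vlN l

def bcI : List (Nat × Char) → Int
  | [] => 0
  | (_, c) :: l => (if c = '-' then 0 else 1) + bcI l

def zlP (ps : List Int) (pattern : String) : List (Nat × Char) :=
  ps.map (fun i => (i.toNat, (PySem.Str.pyGet? pattern (31 - i)).getD ' '))

def okB (a : Int) (pc : Nat × Char) : Bool :=
  (!(pc.2 == '0') || (bitOf a pc.1 == 0)) && (!(pc.2 == '1') || (bitOf a pc.1 == 1))

lemma bitOf_bounds (a : Int) (p : Nat) : 0 ≤ bitOf a p ∧ bitOf a p < 2 :=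
  ⟨PySem.Int.mod_nonneg _ (by norm_num), PySem.Int.mod_lt _ (by norm_num)⟩

lemma compile_fold (pattern : String) : ∀ (ps : List Int) (acc : Int × Int × Int),
    ps.foldl (cstep pattern) acc
      = (acc.1 + ↑(mkN (zlP ps pattern)), acc.2.1 + ↑(vlN (zlP ps pattern)), acc.2.2 + bcI (zlP ps pattern)) := by
  intro ps
  induction ps with
  | nil => intro acc; simp [zlP, mkN, vlN, bcI]
  | cons i rest ih =>
    intro acc
    rw [List.foldl_cons, ih]
    simp only [zlP, List.map_cons, mkN, vlN, bcI, cstep, PySem.Str.pyGet?]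
    by_cases hd : (PySem.List.pyGet? pattern.toList (31 - i)).getD ' ' = '-'
    · simp [hd, Prod.ext_iff] <;> push_cast <;> omega
    · by_cases h0 : (PySem.List.pyGet? pattern.toList (31 - i)).getD ' ' = '0'
      · simp [hd, h0, Int.shiftLeft_eq, Prod.ext_iff] <;> push_cast <;> omega
      · by_cases h1 : (PySem.List.pyGet? pattern.toList (31 - i)).getD ' ' = '1'
        · simp [hd, h0, h1, Int.shiftLeft_eq, Prod.ext_iff] <;> push_cast <;> omega
        · simp [hd, h0, h1, Prod.ext_iff] <;> push_cast <;> omega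

lemma compilePat_eq (p : String) :
    compilePat p = (↑(mkN (zlP (PySem.List.pyRange 4 8 1 ++ PySem.List.pyRange 20 28 1) p)),
                    ↑(vlN (zlP (PySem.List.pyRange 4 8 1 ++ PySem.List.pyRange 20 28 1) p)),
                    bcI (zlP (PySem.List.pyRange 4 8 1 ++ PySem.List.pyRange 20 28 1) p)) := by
  have h := compile_fold p (PySem.List.pyRange 4 8 1 ++ PySem.List.pyRange 20 28 1) (0, 0, 0)
  unfold compilePat
  rw [h]
  simp only [zero_add]

-- Nat core: AND distributes over a sum of bit-disjoint parts 2^p + M (2^(p+1) ∣ M)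
-- cast/shift bridges to the Nat level
lemma ofNat_shr (n p : Nat) : (Int.ofNat n) >>> p = Int.ofNat (n >>> p) := by
  simp [Int.natCast_shiftRight]

lemma bitOf_ofNat (n p : Nat) : bitOf (Int.ofNat n) p = ((n >>> p) % 2 : Nat) := by
  unfold bitOf
  rw [ofNat_shr, PySem.Int.mod_eq_emod_of_pos (by norm_num)]
  simp only [Int.ofNat_eq_natCast]
  omega

lemma bitOf_negSucc (n p : Nat) : bitOf (Int.negSucc n) p = 1 - ((n >>> p) % 2 : Nat) := by
  unfold bitOf
  rw [Int.negSucc_shiftRight, PySem.Int.mod_eq_emod_of_pos (by norm_num), Int.negSucc_eq]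
  omega

lemma tb (n p : Nat) : (n.testBit p).toNat = (n >>> p) % 2 := by
  rw [Nat.testBit_eq_decide_div_mod_eq, Nat.shiftRight_eq_div_pow]
  rcases Nat.mod_two_eq_zero_or_one (n / 2^p) with h | h <;> simp [h]

lemma band_ofNat (n : Nat) (M : Nat) : PySem.Int.band (Int.ofNat n) ↑M = ↑(n &&& M) := by
  exact_mod_cast PySem.Int.band_natCast n M

lemma band_negSucc (n : Nat) (M : Nat) : PySem.Int.band (Int.negSucc n) ↑M = ↑(M - (M &&& n)) := by
  have h1 : ¬ (0 ≤ Int.negSucc n) := by omega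
  have h2 : (0:Int) ≤ ↑M := by positivity
  have h3 : (-(Int.negSucc n) - 1) = ↑n := by rw [Int.negSucc_eq]; ring
  simp only [PySem.Int.band, h1, if_false, h2, if_true, h3]
  simp

lemma nat_and_split (n p M : Nat) (hM : 2^(p+1) ∣ M) :
    n &&& (2^p + M) = (n &&& 2^p) + (n &&& M) := by
  obtain ⟨m, rfl⟩ := hM
  have hKpos : 0 < 2^(p+1) := by positivity
  have hpK : 2^p < 2^(p+1) := Nat.pow_lt_pow_succ (by norm_num)
  have hmodX : (2^p + 2^(p+1) * m) % 2^(p+1) = 2^p := by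
    rw [Nat.add_mul_mod_self_left, Nat.mod_eq_of_lt hpK]
  have hdivX : (2^p + 2^(p+1) * m) / 2^(p+1) = m := by
    rw [Nat.add_mul_div_left _ _ hKpos, Nat.div_eq_of_lt hpK, Nat.zero_add]
  have h1 : (n &&& (2^p + 2^(p+1)*m)) % 2^(p+1) = (n % 2^(p+1)) &&& 2^p := by
    rw [Nat.and_mod_two_pow, hmodX]
  have h2 : (n &&& (2^p + 2^(p+1)*m)) / 2^(p+1) = (n / 2^(p+1)) &&& m := by
    rw [Nat.and_div_two_pow, hdivX]
  have h3 : n &&& 2^p = (n % 2^(p+1)) &&& 2^p := by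
    rw [Nat.and_two_pow, Nat.and_two_pow]
    congr 1
    rw [Nat.testBit_mod_two_pow]
    simp [Nat.lt_succ_self]
  have h4 : (n &&& (2^(p+1)*m)) % 2^(p+1) = 0 := by
    rw [Nat.and_mod_two_pow, Nat.mul_mod_right]
    simp
  have h5 : (n &&& (2^(p+1)*m)) / 2^(p+1) = (n / 2^(p+1)) &&& m := by
    rw [Nat.and_div_two_pow, Nat.mul_div_cancel_left _ hKpos]
  have hX : n &&& (2^p + 2^(p+1)*m)
      = 2^(p+1) * ((n / 2^(p+1)) &&& m) + ((n % 2^(p+1)) &&& 2^p) := by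
    conv_lhs => rw [← Nat.div_add_mod (n &&& (2^p + 2^(p+1)*m)) (2^(p+1))]
    rw [h1, h2]
  have hA : n &&& (2^(p+1)*m) = 2^(p+1) * ((n / 2^(p+1)) &&& m) := by
    conv_lhs => rw [← Nat.div_add_mod (n &&& (2^(p+1)*m)) (2^(p+1))]
    rw [h4, h5]
    ring
  rw [hX, hA, h3]
  ring

lemma band_two_pow (a : Int) (p : Nat) :
    PySem.Int.band a ↑(2^p : Nat) = bitOf a p * 2^p := by
  cases a with
  | ofNat n =>
    rw [band_ofNat, Nat.and_two_pow, bitOf_ofNat, tb]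
    push_cast; ring
  | negSucc n =>
    rw [band_negSucc, bitOf_negSucc, Nat.and_comm, Nat.and_two_pow, tb]
    rcases Nat.mod_two_eq_zero_or_one (n >>> p) with h | h
    · rw [h]; simp
    · rw [h]; simp

lemma band_split (a : Int) (p : Nat) (M : Nat) (hM : 2^(p+1) ∣ M) :
    PySem.Int.band a ↑(2^p + M) = PySem.Int.band a ↑(2^p : Nat) + PySem.Int.band a ↑M := by
  cases a with
  | ofNat n =>
    rw [band_ofNat, band_ofNat, band_ofNat, nat_and_split n p M hM]
    push_cast; ring
  | negSucc n =>
    rw [band_negSucc, band_negSucc, band_negSucc]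
    have hsplit : (2^p + M) &&& n = (2^p &&& n) + (M &&& n) := by
      rw [Nat.and_comm, nat_and_split n p M hM, Nat.and_comm n, Nat.and_comm n]
    have l1 : 2^p &&& n ≤ 2^p := Nat.and_le_left
    have l2 : M &&& n ≤ M := Nat.and_le_left
    rw [hsplit]
    omega

lemma band_dvd (a : Int) (k : Nat) (M : Nat) (hM : 2^k ∣ M) :
    ∃ y : Nat, PySem.Int.band a ↑M = ↑(2^k * y) := by
  obtain ⟨mq, rfl⟩ := hM
  have hM0 : (2^k * mq) % 2^k = 0 := Nat.mul_mod_right _ _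
  cases a with
  | ofNat n =>
    have h : (n &&& 2^k * mq) % 2^k = 0 := by
      rw [Nat.and_mod_two_pow, hM0, Nat.and_zero]
    obtain ⟨y, hy⟩ := Nat.dvd_of_mod_eq_zero h
    exact ⟨y, by rw [band_ofNat, hy]⟩
  | negSucc n =>
    have h : (2^k * mq &&& n) % 2^k = 0 := by
      rw [Nat.and_mod_two_pow, hM0, Nat.zero_and]
    obtain ⟨u, hu⟩ := Nat.dvd_of_mod_eq_zero h
    refine ⟨mq - u, ?_⟩
    rw [band_negSucc, hu, ← Nat.mul_sub]

lemma dvd_mk (k : Nat) : ∀ (l : List (Nat × Char)), (∀ x ∈ l, k ≤ x.1) →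
    2^k ∣ mkN l ∧ 2^k ∣ vlN l := by
  intro l
  induction l with
  | nil => intro _; simp [mkN, vlN]
  | cons hd tl ih =>
    intro h
    obtain ⟨ih1, ih2⟩ := ih (fun x hx => h x (List.mem_cons_of_mem _ hx))
    have hk : k ≤ hd.1 := h hd (List.mem_cons_self)
    obtain ⟨p, c⟩ := hd
    constructor
    · exact Nat.dvd_add (by split_ifs <;> simp [Nat.pow_dvd_pow 2 hk]) ih1
    · exact Nat.dvd_add (by split_ifs <;> simp [Nat.pow_dvd_pow 2 hk]) ih2

-- core characterisation: the single integer test equals the per-position bit conditions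
lemma band_mask_iff (a : Int) : ∀ (l : List (Nat × Char)),
    l.Pairwise (fun x y => x.1 < y.1) →
    ((PySem.Int.band a ↑(mkN l) = ↑(vlN l)) ↔ l.all (okB a) = true) := by
  intro l
  induction l with
  | nil => intro _; simp [mkN, vlN]
  | cons hd tl ih =>
    intro hpw
    obtain ⟨p, c⟩ := hd
    rw [List.pairwise_cons] at hpw
    obtain ⟨hlt, hpw'⟩ := hpw
    obtain ⟨hdm, hdv⟩ := dvd_mk (p+1) tl (fun x hx => hlt x hx)
    obtain ⟨y, hy⟩ := band_dvd a (p+1) (mkN tl) hdm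
    obtain ⟨x, hx⟩ := hdv
    have IH := ih hpw'
    have hbit := bitOf_bounds a p
    have hpow : (0:Int) < 2^p := by positivity
    simp only [mkN, vlN, List.all_cons]
    by_cases h0 : c = '0'
    · rw [if_pos (Or.inl h0), if_neg (by simp [h0])]
      rw [band_split a p (mkN tl) hdm, band_two_pow, hy]
      have hok : okB a (p, c) = (bitOf a p == 0) := by
        simp [okB, h0]
      rw [hok]
      constructor
      · intro he
        rw [hx] at he
        push_cast at he
        have key : (2:ℤ)^p * (bitOf a p + 2*(y:ℤ)) = (2:ℤ)^p * (2*(x:ℤ)) := by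
          linear_combination he
        have hc := mul_left_cancel₀ (ne_of_gt hpow) key
        have hb0 : bitOf a p = 0 ∧ (y:ℤ) = (x:ℤ) := by omega
        have htl : PySem.Int.band a ↑(mkN tl) = ↑(vlN tl) := by
          rw [hy, hx]
          exact_mod_cast congrArg (fun z => (2:ℤ)^(p+1) * z) hb0.2
        rw [IH.mp htl]
        simp [hb0.1]
      · intro hh
        obtain ⟨hb, hall⟩ := Bool.and_eq_true_iff.mp hh
        have hb0 : bitOf a p = 0 := by simpa using hb
        have htl := IH.mpr hall
        rw [← hy, hb0, htl]
        push_cast; ring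
    · by_cases h1 : c = '1'
      · rw [if_pos (Or.inr h1), if_pos h1]
        rw [band_split a p (mkN tl) hdm, band_two_pow, hy]
        have hok : okB a (p, c) = (bitOf a p == 1) := by
          simp [okB, h0, h1]
        rw [hok]
        constructor
        · intro he
          rw [hx] at he
          push_cast at he
          have key : (2:ℤ)^p * (bitOf a p + 2*(y:ℤ)) = (2:ℤ)^p * (1 + 2*(x:ℤ)) := by
            linear_combination he
          have hc := mul_left_cancel₀ (ne_of_gt hpow) key
          have hb1 : bitOf a p = 1 ∧ (y:ℤ) = (x:ℤ) := by omega
          have htl : PySem.Int.band a ↑(mkN tl) = ↑(vlN tl) := by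
            rw [hy, hx]
            exact_mod_cast congrArg (fun z => (2:ℤ)^(p+1) * z) hb1.2
          rw [IH.mp htl]
          simp [hb1.1]
        · intro hh
          obtain ⟨hb, hall⟩ := Bool.and_eq_true_iff.mp hh
          have hb1 : bitOf a p = 1 := by simpa using hb
          have htl := IH.mpr hall
          rw [← hy, hb1, htl]
          push_cast; ring
      · rw [if_neg (by tauto), if_neg h1]
        have hok : okB a (p, c) = true := by
          simp [okB, h0, h1]
        rw [hok]
        simp only [Nat.zero_add, true_and, Bool.true_and]
        exact IH

-- per-char Boolean bridge between A's break conditions and okB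
lemma atom_ok' (c : Char) (m : Int) :
    (!decide (c = '0' ∧ m ≠ 0) && !decide (c = '1' ∧ m ≠ 1))
      = ((!(c == '0') || (m == 0)) && (!(c == '1') || (m == 1))) := by
  by_cases h0 : c = '0' <;> by_cases h1 : c = '1' <;> by_cases hm0 : m = 0 <;>
    by_cases hm1 : m = 1 <;> simp_all

-- a skipped inner-loop index contributes nothing to A's test
lemma atomA_skip (a : Int) (p : String) (i : Int)
    (h : 27 < i ∨ (i < 20 ∧ 7 < i) ∨ i < 4) : atomA a p i = true := by
  rcases h with h | h | h <;> simp [atomA, h]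

lemma bfe_one (a : Int) (i : Int) : bfe a i 1 = PySem.Int.mod (a >>> i.toNat) 2 := by
  have h2 : ((1:Nat) <<< (1:Int).toNat) = 2 := by decide
  rw [bfe, h2]
  norm_num [PySem.Int.band_one]

-- at a live index A's per-bit test is exactly okB on (index, pattern char)
lemma atom_eq_ok (a : Int) (p : String) (i : Int) (n : Nat) (c : Char) (hin : i.toNat = n)
    (hrange : (4 ≤ i ∧ i ≤ 7) ∨ (20 ≤ i ∧ i ≤ 27))
    (hc : (PySem.Str.pyGet? p (31 - i)).getD ' ' = c) :
    atomA a p i = okB a (n, c) := by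
  subst hin
  have h1 : ¬ 27 < i := by omega
  have h2 : ¬ (i < 20 ∧ 7 < i) := by omega
  have h3 : ¬ i < 4 := by omega
  unfold atomA okB
  rw [hc, bfe_one]
  simp only [h1, h2, h3, decide_false, Bool.false_or, decide_eq_false, not_false_iff]
  show _ = ((!(c == '0') || (bitOf a i.toNat == 0)) && (!(c == '1') || (bitOf a i.toNat == 1)))
  rw [show bitOf a i.toNat = PySem.Int.mod (a >>> i.toNat) 2 from rfl]
  exact atom_ok' c (PySem.Int.mod (a >>> i.toNat) 2)

lemma entry_fst (a : Int) (p : String) (hp : 28 ≤ p.toList.length) :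
    ((matchBits a p (PySem.List.pyRange 0 31 1) 0).1 = true)
      ↔ PySem.Int.band a (compilePat p).1 = (compilePat p).2.1 := by
  rw [matchBits_fst, compilePat_eq]
  obtain ⟨c0, c1, c2, c3, c4, c5, c6, c7, c8, c9, c10, c11, c12, c13, c14, c15, c16, c17, c18, c19, c20, c21, c22, c23, c24, c25, c26, c27, t, hl⟩ := exists_cons28 p.toList hp
  have g4 : (PySem.List.pyGet? (c0::c1::c2::c3::c4::c5::c6::c7::c8::c9::c10::c11::c12::c13::c14::c15::c16::c17::c18::c19::c20::c21::c22::c23::c24::c25::c26::c27::t) (4:Int)).getD ' ' = c4 := by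
    rw [show (4:Int) = ((4:Nat):Int) from rfl, PySem.List.pyGet?_ofNat _ 4 (by simp only [List.length_cons]; omega)]
    simp
  have g5 : (PySem.List.pyGet? (c0::c1::c2::c3::c4::c5::c6::c7::c8::c9::c10::c11::c12::c13::c14::c15::c16::c17::c18::c19::c20::c21::c22::c23::c24::c25::c26::c27::t) (5:Int)).getD ' ' = c5 := by
    rw [show (5:Int) = ((5:Nat):Int) from rfl, PySem.List.pyGet?_ofNat _ 5 (by simp only [List.length_cons]; omega)]
    simp
  have g6 : (PySem.List.pyGet? (c0::c1::c2::c3::c4::c5::c6::c7::c8::c9::c10::c11::c12::c13::c14::c15::c16::c17::c18::c19::c20::c21::c22::c23::c24::c25::c26::c27::t) (6:Int)).getD ' ' = c6 := by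
    rw [show (6:Int) = ((6:Nat):Int) from rfl, PySem.List.pyGet?_ofNat _ 6 (by simp only [List.length_cons]; omega)]
    simp
  have g7 : (PySem.List.pyGet? (c0::c1::c2::c3::c4::c5::c6::c7::c8::c9::c10::c11::c12::c13::c14::c15::c16::c17::c18::c19::c20::c21::c22::c23::c24::c25::c26::c27::t) (7:Int)).getD ' ' = c7 := by
    rw [show (7:Int) = ((7:Nat):Int) from rfl, PySem.List.pyGet?_ofNat _ 7 (by simp only [List.length_cons]; omega)]
    simp
  have g8 : (PySem.List.pyGet? (c0::c1::c2::c3::c4::c5::c6::c7::c8::c9::c10::c11::c12::c13::c14::c15::c16::c17::c18::c19::c20::c21::c22::c23::c24::c25::c26::c27::t) (8:Int)).getD ' ' = c8 := by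
    rw [show (8:Int) = ((8:Nat):Int) from rfl, PySem.List.pyGet?_ofNat _ 8 (by simp only [List.length_cons]; omega)]
    simp
  have g9 : (PySem.List.pyGet? (c0::c1::c2::c3::c4::c5::c6::c7::c8::c9::c10::c11::c12::c13::c14::c15::c16::c17::c18::c19::c20::c21::c22::c23::c24::c25::c26::c27::t) (9:Int)).getD ' ' = c9 := by
    rw [show (9:Int) = ((9:Nat):Int) from rfl, PySem.List.pyGet?_ofNat _ 9 (by simp only [List.length_cons]; omega)]
    simp
  have g10 : (PySem.List.pyGet? (c0::c1::c2::c3::c4::c5::c6::c7::c8::c9::c10::c11::c12::c13::c14::c15::c16::c17::c18::c19::c20::c21::c22::c23::c24::c25::c26::c27::t) (10:Int)).getD ' ' = c10 := by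
    rw [show (10:Int) = ((10:Nat):Int) from rfl, PySem.List.pyGet?_ofNat _ 10 (by simp only [List.length_cons]; omega)]
    simp
  have g11 : (PySem.List.pyGet? (c0::c1::c2::c3::c4::c5::c6::c7::c8::c9::c10::c11::c12::c13::c14::c15::c16::c17::c18::c19::c20::c21::c22::c23::c24::c25::c26::c27::t) (11:Int)).getD ' ' = c11 := by
    rw [show (11:Int) = ((11:Nat):Int) from rfl, PySem.List.pyGet?_ofNat _ 11 (by simp only [List.length_cons]; omega)]
    simp
  have g24 : (PySem.List.pyGet? (c0::c1::c2::c3::c4::c5::c6::c7::c8::c9::c10::c11::c12::c13::c14::c15::c16::c17::c18::c19::c20::c21::c22::c23::c24::c25::c26::c27::t) (24:Int)).getD ' ' = c24 := by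
    rw [show (24:Int) = ((24:Nat):Int) from rfl, PySem.List.pyGet?_ofNat _ 24 (by simp only [List.length_cons]; omega)]
    simp
  have g25 : (PySem.List.pyGet? (c0::c1::c2::c3::c4::c5::c6::c7::c8::c9::c10::c11::c12::c13::c14::c15::c16::c17::c18::c19::c20::c21::c22::c23::c24::c25::c26::c27::t) (25:Int)).getD ' ' = c25 := by
    rw [show (25:Int) = ((25:Nat):Int) from rfl, PySem.List.pyGet?_ofNat _ 25 (by simp only [List.length_cons]; omega)]
    simp
  have g26 : (PySem.List.pyGet? (c0::c1::c2::c3::c4::c5::c6::c7::c8::c9::c10::c11::c12::c13::c14::c15::c16::c17::c18::c19::c20::c21::c22::c23::c24::c25::c26::c27::t) (26:Int)).getD ' ' = c26 := by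
    rw [show (26:Int) = ((26:Nat):Int) from rfl, PySem.List.pyGet?_ofNat _ 26 (by simp only [List.length_cons]; omega)]
    simp
  have g27 : (PySem.List.pyGet? (c0::c1::c2::c3::c4::c5::c6::c7::c8::c9::c10::c11::c12::c13::c14::c15::c16::c17::c18::c19::c20::c21::c22::c23::c24::c25::c26::c27::t) (27:Int)).getD ' ' = c27 := by
    rw [show (27:Int) = ((27:Nat):Int) from rfl, PySem.List.pyGet?_ofNat _ 27 (by simp only [List.length_cons]; omega)]
    simp
  have hzl : zlP (PySem.List.pyRange 4 8 1 ++ PySem.List.pyRange 20 28 1) p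
      = [((4 : Nat), c27), ((5 : Nat), c26), ((6 : Nat), c25), ((7 : Nat), c24), ((20 : Nat), c11), ((21 : Nat), c10), ((22 : Nat), c9), ((23 : Nat), c8), ((24 : Nat), c7), ((25 : Nat), c6), ((26 : Nat), c5), ((27 : Nat), c4)] := by
    have hps : PySem.List.pyRange 4 8 1 ++ PySem.List.pyRange 20 28 1 = [4,5,6,7,20,21,22,23,24,25,26,27] := by decide
    rw [hps]
    simp [zlP, PySem.Str.pyGet?, hl, g4, g5, g6, g7, g8, g9, g10, g11, g24, g25, g26, g27]
  rw [hzl]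
  dsimp only
  rw [band_mask_iff a _ (by norm_num [List.pairwise_cons])]
  have hR : PySem.List.pyRange 0 31 1 = [0,1,2,3,4,5,6,7,8,9,10,11,12,13,14,15,16,17,18,19,20,21,22,23,24,25,26,27,28,29,30] := by decide
  have hB : (PySem.List.pyRange 0 31 1).all (atomA a p)
      = ([((4 : Nat), c27), ((5 : Nat), c26), ((6 : Nat), c25), ((7 : Nat), c24), ((20 : Nat), c11), ((21 : Nat), c10), ((22 : Nat), c9), ((23 : Nat), c8), ((24 : Nat), c7), ((25 : Nat), c6), ((26 : Nat), c5), ((27 : Nat), c4)] : List (Nat × Char)).all (okB a) := by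
    rw [hR]
    simp only [List.all_cons, List.all_nil, Bool.and_true]
    rw [atomA_skip a p 0 (by norm_num),
      atomA_skip a p 1 (by norm_num),
      atomA_skip a p 2 (by norm_num),
      atomA_skip a p 3 (by norm_num),
      atomA_skip a p 8 (by norm_num),
      atomA_skip a p 9 (by norm_num),
      atomA_skip a p 10 (by norm_num),
      atomA_skip a p 11 (by norm_num),
      atomA_skip a p 12 (by norm_num),
      atomA_skip a p 13 (by norm_num),
      atomA_skip a p 14 (by norm_num),
      atomA_skip a p 15 (by norm_num),
      atomA_skip a p 16 (by norm_num),
      atomA_skip a p 17 (by norm_num),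
      atomA_skip a p 18 (by norm_num),
      atomA_skip a p 19 (by norm_num),
      atomA_skip a p 28 (by norm_num),
      atomA_skip a p 29 (by norm_num),
      atomA_skip a p 30 (by norm_num),
      atom_eq_ok a p 4 4 c27 rfl (by norm_num) (by simp [PySem.Str.pyGet?, hl, g27]),
      atom_eq_ok a p 5 5 c26 rfl (by norm_num) (by simp [PySem.Str.pyGet?, hl, g26]),
      atom_eq_ok a p 6 6 c25 rfl (by norm_num) (by simp [PySem.Str.pyGet?, hl, g25]),
      atom_eq_ok a p 7 7 c24 rfl (by norm_num) (by simp [PySem.Str.pyGet?, hl, g24]),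
      atom_eq_ok a p 20 20 c11 rfl (by norm_num) (by simp [PySem.Str.pyGet?, hl, g11]),
      atom_eq_ok a p 21 21 c10 rfl (by norm_num) (by simp [PySem.Str.pyGet?, hl, g10]),
      atom_eq_ok a p 22 22 c9 rfl (by norm_num) (by simp [PySem.Str.pyGet?, hl, g9]),
      atom_eq_ok a p 23 23 c8 rfl (by norm_num) (by simp [PySem.Str.pyGet?, hl, g8]),
      atom_eq_ok a p 24 24 c7 rfl (by norm_num) (by simp [PySem.Str.pyGet?, hl, g7]),
      atom_eq_ok a p 25 25 c6 rfl (by norm_num) (by simp [PySem.Str.pyGet?, hl, g6]),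
      atom_eq_ok a p 26 26 c5 rfl (by norm_num) (by simp [PySem.Str.pyGet?, hl, g5]),
      atom_eq_ok a p 27 27 c4 rfl (by norm_num) (by simp [PySem.Str.pyGet?, hl, g4])]
    simp only [Bool.true_and, Bool.and_true]
  rw [hB]

lemma entry_snd (a : Int) (p : String) (hp : 28 ≤ p.toList.length)
    (hm : (matchBits a p (PySem.List.pyRange 0 31 1) 0).1 = true) :
    (matchBits a p (PySem.List.pyRange 0 31 1) 0).2 = (compilePat p).2.2 := by
  rw [matchBits_snd a p _ 0 hm, compilePat_eq]
  obtain ⟨c0, c1, c2, c3, c4, c5, c6, c7, c8, c9, c10, c11, c12, c13, c14, c15, c16, c17, c18, c19, c20, c21, c22, c23, c24, c25, c26, c27, t, hl⟩ := exists_cons28 p.toList hp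
  have g4 : (PySem.List.pyGet? (c0::c1::c2::c3::c4::c5::c6::c7::c8::c9::c10::c11::c12::c13::c14::c15::c16::c17::c18::c19::c20::c21::c22::c23::c24::c25::c26::c27::t) (4:Int)).getD ' ' = c4 := by
    rw [show (4:Int) = ((4:Nat):Int) from rfl, PySem.List.pyGet?_ofNat _ 4 (by simp only [List.length_cons]; omega)]
    simp
  have g5 : (PySem.List.pyGet? (c0::c1::c2::c3::c4::c5::c6::c7::c8::c9::c10::c11::c12::c13::c14::c15::c16::c17::c18::c19::c20::c21::c22::c23::c24::c25::c26::c27::t) (5:Int)).getD ' ' = c5 := by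
    rw [show (5:Int) = ((5:Nat):Int) from rfl, PySem.List.pyGet?_ofNat _ 5 (by simp only [List.length_cons]; omega)]
    simp
  have g6 : (PySem.List.pyGet? (c0::c1::c2::c3::c4::c5::c6::c7::c8::c9::c10::c11::c12::c13::c14::c15::c16::c17::c18::c19::c20::c21::c22::c23::c24::c25::c26::c27::t) (6:Int)).getD ' ' = c6 := by
    rw [show (6:Int) = ((6:Nat):Int) from rfl, PySem.List.pyGet?_ofNat _ 6 (by simp only [List.length_cons]; omega)]
    simp
  have g7 : (PySem.List.pyGet? (c0::c1::c2::c3::c4::c5::c6::c7::c8::c9::c10::c11::c12::c13::c14::c15::c16::c17::c18::c19::c20::c21::c22::c23::c24::c25::c26::c27::t) (7:Int)).getD ' ' = c7 := by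
    rw [show (7:Int) = ((7:Nat):Int) from rfl, PySem.List.pyGet?_ofNat _ 7 (by simp only [List.length_cons]; omega)]
    simp
  have g8 : (PySem.List.pyGet? (c0::c1::c2::c3::c4::c5::c6::c7::c8::c9::c10::c11::c12::c13::c14::c15::c16::c17::c18::c19::c20::c21::c22::c23::c24::c25::c26::c27::t) (8:Int)).getD ' ' = c8 := by
    rw [show (8:Int) = ((8:Nat):Int) from rfl, PySem.List.pyGet?_ofNat _ 8 (by simp only [List.length_cons]; omega)]
    simp
  have g9 : (PySem.List.pyGet? (c0::c1::c2::c3::c4::c5::c6::c7::c8::c9::c10::c11::c12::c13::c14::c15::c16::c17::c18::c19::c20::c21::c22::c23::c24::c25::c26::c27::t) (9:Int)).getD ' ' = c9 := by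
    rw [show (9:Int) = ((9:Nat):Int) from rfl, PySem.List.pyGet?_ofNat _ 9 (by simp only [List.length_cons]; omega)]
    simp
  have g10 : (PySem.List.pyGet? (c0::c1::c2::c3::c4::c5::c6::c7::c8::c9::c10::c11::c12::c13::c14::c15::c16::c17::c18::c19::c20::c21::c22::c23::c24::c25::c26::c27::t) (10:Int)).getD ' ' = c10 := by
    rw [show (10:Int) = ((10:Nat):Int) from rfl, PySem.List.pyGet?_ofNat _ 10 (by simp only [List.length_cons]; omega)]
    simp
  have g11 : (PySem.List.pyGet? (c0::c1::c2::c3::c4::c5::c6::c7::c8::c9::c10::c11::c12::c13::c14::c15::c16::c17::c18::c19::c20::c21::c22::c23::c24::c25::c26::c27::t) (11:Int)).getD ' ' = c11 := by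
    rw [show (11:Int) = ((11:Nat):Int) from rfl, PySem.List.pyGet?_ofNat _ 11 (by simp only [List.length_cons]; omega)]
    simp
  have g24 : (PySem.List.pyGet? (c0::c1::c2::c3::c4::c5::c6::c7::c8::c9::c10::c11::c12::c13::c14::c15::c16::c17::c18::c19::c20::c21::c22::c23::c24::c25::c26::c27::t) (24:Int)).getD ' ' = c24 := by
    rw [show (24:Int) = ((24:Nat):Int) from rfl, PySem.List.pyGet?_ofNat _ 24 (by simp only [List.length_cons]; omega)]
    simp
  have g25 : (PySem.List.pyGet? (c0::c1::c2::c3::c4::c5::c6::c7::c8::c9::c10::c11::c12::c13::c14::c15::c16::c17::c18::c19::c20::c21::c22::c23::c24::c25::c26::c27::t) (25:Int)).getD ' ' = c25 := by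
    rw [show (25:Int) = ((25:Nat):Int) from rfl, PySem.List.pyGet?_ofNat _ 25 (by simp only [List.length_cons]; omega)]
    simp
  have g26 : (PySem.List.pyGet? (c0::c1::c2::c3::c4::c5::c6::c7::c8::c9::c10::c11::c12::c13::c14::c15::c16::c17::c18::c19::c20::c21::c22::c23::c24::c25::c26::c27::t) (26:Int)).getD ' ' = c26 := by
    rw [show (26:Int) = ((26:Nat):Int) from rfl, PySem.List.pyGet?_ofNat _ 26 (by simp only [List.length_cons]; omega)]
    simp
  have g27 : (PySem.List.pyGet? (c0::c1::c2::c3::c4::c5::c6::c7::c8::c9::c10::c11::c12::c13::c14::c15::c16::c17::c18::c19::c20::c21::c22::c23::c24::c25::c26::c27::t) (27:Int)).getD ' ' = c27 := by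
    rw [show (27:Int) = ((27:Nat):Int) from rfl, PySem.List.pyGet?_ofNat _ 27 (by simp only [List.length_cons]; omega)]
    simp
  have hzl : zlP (PySem.List.pyRange 4 8 1 ++ PySem.List.pyRange 20 28 1) p
      = [((4 : Nat), c27), ((5 : Nat), c26), ((6 : Nat), c25), ((7 : Nat), c24), ((20 : Nat), c11), ((21 : Nat), c10), ((22 : Nat), c9), ((23 : Nat), c8), ((24 : Nat), c7), ((25 : Nat), c6), ((26 : Nat), c5), ((27 : Nat), c4)] := by
    have hps : PySem.List.pyRange 4 8 1 ++ PySem.List.pyRange 20 28 1 = [4,5,6,7,20,21,22,23,24,25,26,27] := by decide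
    rw [hps]
    simp [zlP, PySem.Str.pyGet?, hl, g4, g5, g6, g7, g8, g9, g10, g11, g24, g25, g26, g27]
  rw [hzl]
  dsimp only
  have cnt_skip : ∀ (i : Int), (27 < i ∨ (i < 20 ∧ 7 < i) ∨ i < 4) → cntA p i = false := by
    intro i h
    rcases h with h | h | h <;> simp [cntA, h]
  have cnt_live : ∀ (i : Int) (c : Char), ((4 ≤ i ∧ i ≤ 7) ∨ (20 ≤ i ∧ i ≤ 27)) →
      (PySem.Str.pyGet? p (31 - i)).getD ' ' = c → cntA p i = !(c == '-') := by
    intro i c hr hc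
    have h1 : ¬ 27 < i := by omega
    have h2 : ¬ (i < 20 ∧ 7 < i) := by omega
    have h3 : ¬ i < 4 := by omega
    unfold cntA
    rw [hc]
    simp [h1, h2, h3]
    by_cases h4 : c = '-' <;> simp [h4]
  have hR : PySem.List.pyRange 0 31 1 = [0,1,2,3,4,5,6,7,8,9,10,11,12,13,14,15,16,17,18,19,20,21,22,23,24,25,26,27,28,29,30] := by decide
  rw [hR]
  simp only [List.countP_cons, List.countP_nil]
  rw [cnt_skip 0 (by norm_num),
      cnt_skip 1 (by norm_num),
      cnt_skip 2 (by norm_num),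
      cnt_skip 3 (by norm_num),
      cnt_skip 8 (by norm_num),
      cnt_skip 9 (by norm_num),
      cnt_skip 10 (by norm_num),
      cnt_skip 11 (by norm_num),
      cnt_skip 12 (by norm_num),
      cnt_skip 13 (by norm_num),
      cnt_skip 14 (by norm_num),
      cnt_skip 15 (by norm_num),
      cnt_skip 16 (by norm_num),
      cnt_skip 17 (by norm_num),
      cnt_skip 18 (by norm_num),
      cnt_skip 19 (by norm_num),
      cnt_skip 28 (by norm_num),
      cnt_skip 29 (by norm_num),
      cnt_skip 30 (by norm_num),
      cnt_live 4 c27 (by norm_num) (by simp [PySem.Str.pyGet?, hl, g27]),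
      cnt_live 5 c26 (by norm_num) (by simp [PySem.Str.pyGet?, hl, g26]),
      cnt_live 6 c25 (by norm_num) (by simp [PySem.Str.pyGet?, hl, g25]),
      cnt_live 7 c24 (by norm_num) (by simp [PySem.Str.pyGet?, hl, g24]),
      cnt_live 20 c11 (by norm_num) (by simp [PySem.Str.pyGet?, hl, g11]),
      cnt_live 21 c10 (by norm_num) (by simp [PySem.Str.pyGet?, hl, g10]),
      cnt_live 22 c9 (by norm_num) (by simp [PySem.Str.pyGet?, hl, g9]),
      cnt_live 23 c8 (by norm_num) (by simp [PySem.Str.pyGet?, hl, g8]),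
      cnt_live 24 c7 (by norm_num) (by simp [PySem.Str.pyGet?, hl, g7]),
      cnt_live 25 c6 (by norm_num) (by simp [PySem.Str.pyGet?, hl, g6]),
      cnt_live 26 c5 (by norm_num) (by simp [PySem.Str.pyGet?, hl, g5]),
      cnt_live 27 c4 (by norm_num) (by simp [PySem.Str.pyGet?, hl, g4])]
  have hone : ∀ (c : Char), (if (!(c == '-')) = true then (1:Nat) else 0) = (if c = '-' then 0 else 1) := by
    intro c
    by_cases h : c = '-' <;> simp [h]
  simp only [hone, bcI]
  push_cast
  ring

-- ===== VERDICT (by name: the statement is the Claim_ definition above) =====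
theorem match_op_spec : Claim_equal_match_op := by
  intro optable arm_op _ hpre
  unfold Spec_match_op match_op match_op_alt
  obtain ⟨hnd, hok⟩ := hpre
  simp only [List.foldl_map]
  refine congrArg Prod.snd (PySem.List.foldl_congr_mem optable _ _ ((-1 : Int), "unknown") ?_)
  intro acc kv hkv
  have hlook := dict_get_of_mem optable kv hnd hkv
  have hek : entryOK kv = true := List.all_eq_true.mp hok kv hkv
  cases hpat : PySem.Dict.get? (⟨kv.2⟩ : PySem.Dict String String) "pattern" with
  | none => rw [entryOK, hpat] at hek; cases hek
  | some pp =>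
    rw [entryOK, hpat] at hek
    have hp : 28 ≤ pp.toList.length := by simpa using hek
    rw [hlook]
    simp only [Option.getD_some, hpat]
    by_cases hm : (matchBits arm_op pp (PySem.List.pyRange 0 31 1) 0).1 = true
    · have hz : PySem.Int.band arm_op (compilePat pp).1 = (compilePat pp).2.1 :=
        (entry_fst arm_op pp hp).mp hm
      have h2 := entry_snd arm_op pp hp hm
      rw [h2]
      simp [hm, hz]
    · have hf : (matchBits arm_op pp (PySem.List.pyRange 0 31 1) 0).1 = false :=
        Bool.eq_false_iff.mpr hm
      have hzf : ¬ PySem.Int.band arm_op (compilePat pp).1 = (compilePat pp).2.1 :=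
        fun h => hm ((entry_fst arm_op pp hp).mpr h)
      simp [hf, hzf]
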